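-- pv_equiv track=rewrite | github.com/gibsonac/rts_python_answers | rts_labs_code_exercise_python.py | Above_and_Below
-- ===== SOURCE A (Python) =====
-- def Above_and_Below(givenArray, num):
--     above = 0
--     below = 0
--     if len(givenArray) == 0:
--         return "you need numbers in your Array!"
--     for x in range(len(givenArray)):
--         if givenArray[x] > num:
--             above += 1
--         if givenArray[x] < num:
--             below += 1
--     return (f'above: {above}, below: {below}')
-- ===== SOURCE B (Python) =====
-- def Above_and_Below(givenArray, num):
--     if len(givenArray) == 0:
--         return "you need numbers in your Array!"
--     s = sorted(givenArray)
--     # binary search: first index whose element is >= num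
--     lo, hi = 0, len(s)
--     while lo < hi:
--         mid = (lo + hi) // 2
--         if s[mid] < num:
--             lo = mid + 1
--         else:
--             hi = mid
--     below = lo
--     # binary search: first index whose element is > num
--     lo2, hi2 = 0, len(s)
--     while lo2 < hi2:
--         mid = (lo2 + hi2) // 2
--         if s[mid] <= num:
--             lo2 = mid + 1
--         else:
--             hi2 = mid
--     above = len(s) - lo2
--     return f'above: {above}, below: {below}'
-- ===== Notes on version B (the rewrite author's own statement) =====
-- stated objective: alternative
-- what changed: Replaces the per-index linear scan with sort-then-binary-search: a sorted copy plus two hand-written bisection loops locate the below/above boundaries, and the counts are read off the boundary indices.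
import Mathlib
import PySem

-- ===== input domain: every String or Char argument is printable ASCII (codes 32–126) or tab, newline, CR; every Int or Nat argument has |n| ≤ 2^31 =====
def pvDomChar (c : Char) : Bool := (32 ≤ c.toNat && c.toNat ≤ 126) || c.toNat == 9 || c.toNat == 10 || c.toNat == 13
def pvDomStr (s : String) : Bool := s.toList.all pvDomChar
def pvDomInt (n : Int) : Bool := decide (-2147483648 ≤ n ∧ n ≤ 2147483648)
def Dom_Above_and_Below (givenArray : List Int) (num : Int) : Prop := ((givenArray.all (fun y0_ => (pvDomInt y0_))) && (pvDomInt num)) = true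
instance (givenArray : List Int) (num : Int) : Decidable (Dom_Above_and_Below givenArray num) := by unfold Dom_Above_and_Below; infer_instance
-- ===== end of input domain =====

-- B replaces A's linear index scan by sort-then-binary-search (two bisection loops on a
-- sorted copy); equal return value on every input, no speed claim.

-- ===== PORT A =====
def Above_and_Below (givenArray : List Int) (num : Int) : String :=
  let above : Int := 0
  let below : Int := 0
  if givenArray.length == 0 then
    "you need numbers in your Array!"
  else
    let ab := (PySem.List.pyRange 0 (givenArray.length : Int) 1).foldl
      (fun (ab : Int × Int) x =>
        let v := PySem.List.pyGetD givenArray x 0   -- index from range(len) is always in range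
        (if v > num then ab.1 + 1 else ab.1,
         if v < num then ab.2 + 1 else ab.2))
      (above, below)
    "above: " ++ PySem.Int.toStr ab.1 ++ ", below: " ++ PySem.Int.toStr ab.2

-- ===== PORT B =====
-- first binary-search loop of Source B: first index in [lo,hi) whose element is ≥ num
-- (s[mid] is always in range when lo < hi ≤ len s, so getD is exact there)
def pvBLt (s : List Int) (num : Int) (lo hi : Nat) : Nat :=
  if lo < hi then
    let mid := (lo + hi) / 2
    if s.getD mid 0 < num then pvBLt s num (mid + 1) hi else pvBLt s num lo mid
  else lo
termination_by hi - lo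
decreasing_by all_goals omega

-- second binary-search loop of Source B: first index whose element is > num
def pvBLe (s : List Int) (num : Int) (lo hi : Nat) : Nat :=
  if lo < hi then
    let mid := (lo + hi) / 2
    if s.getD mid 0 ≤ num then pvBLe s num (mid + 1) hi else pvBLe s num lo mid
  else lo
termination_by hi - lo
decreasing_by all_goals omega

def Above_and_Below_alt (givenArray : List Int) (num : Int) : String :=
  if givenArray.length == 0 then
    "you need numbers in your Array!"
  else
    let s := PySem.List.sorted givenArray (fun x => x) false
    let below := pvBLt s num 0 s.length
    let lo2 := pvBLe s num 0 s.length
    let above := s.length - lo2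
    "above: " ++ PySem.Int.toStr (above : Int) ++ ", below: " ++ PySem.Int.toStr (below : Int)

-- ===== PRECONDITION & SPEC =====
def Spec_Above_and_Below (givenArray : List Int) (num : Int) (out : String) : Prop := out = Above_and_Below_alt givenArray num
instance (givenArray : List Int) (num : Int) (out : String) : Decidable (Spec_Above_and_Below givenArray num out) := by unfold Spec_Above_and_Below; infer_instance

-- ===== CLAIM (what is proved, stated in full; the proofs are below) =====
def Claim_equal_Above_and_Below : Prop := ∀ (givenArray : List Int) (num : Int), Dom_Above_and_Below givenArray num → Spec_Above_and_Below givenArray num (Above_and_Below givenArray num)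

-- ===== LEMMAS AND PROOFS =====

-- the binary-search loops return any index k whose left part satisfies / right part refutes the test
theorem pvBLt_eq (s : List Int) (num : Int) (lo hi k : Nat)
    (h1 : lo ≤ k) (h2 : k ≤ hi)
    (hl : ∀ i, lo ≤ i → i < k → s.getD i 0 < num)
    (hr : ∀ i, k ≤ i → i < hi → ¬ s.getD i 0 < num) :
    pvBLt s num lo hi = k := by
  unfold pvBLt
  by_cases h : lo < hi
  · simp only [h, if_true]
    by_cases hm : s.getD ((lo + hi) / 2) 0 < num
    · simp only [hm, if_true]
      have hmk : (lo + hi) / 2 < k := by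
        by_contra hc
        exact hr _ (by omega) (by omega) hm
      exact pvBLt_eq s num _ hi k (by omega) h2
        (fun i h1i h2i => hl i (by omega) h2i)
        (fun i h1i h2i => hr i h1i h2i)
    · simp only [hm, if_false]
      have hmk : k ≤ (lo + hi) / 2 := by
        by_contra hc
        exact hm (hl _ (by omega) (by omega))
      exact pvBLt_eq s num lo _ k h1 hmk
        (fun i h1i h2i => hl i h1i h2i)
        (fun i h1i h2i => hr i h1i (by omega))
  · simp only [h, if_false]; omega
termination_by hi - lo
decreasing_by all_goals omega

theorem pvBLe_eq (s : List Int) (num : Int) (lo hi k : Nat)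
    (h1 : lo ≤ k) (h2 : k ≤ hi)
    (hl : ∀ i, lo ≤ i → i < k → s.getD i 0 ≤ num)
    (hr : ∀ i, k ≤ i → i < hi → ¬ s.getD i 0 ≤ num) :
    pvBLe s num lo hi = k := by
  unfold pvBLe
  by_cases h : lo < hi
  · simp only [h, if_true]
    by_cases hm : s.getD ((lo + hi) / 2) 0 ≤ num
    · simp only [hm, if_true]
      have hmk : (lo + hi) / 2 < k := by
        by_contra hc
        exact hr _ (by omega) (by omega) hm
      exact pvBLe_eq s num _ hi k (by omega) h2
        (fun i h1i h2i => hl i (by omega) h2i)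
        (fun i h1i h2i => hr i h1i h2i)
    · simp only [hm, if_false]
      have hmk : k ≤ (lo + hi) / 2 := by
        by_contra hc
        exact hm (hl _ (by omega) (by omega))
      exact pvBLe_eq s num lo _ k h1 hmk
        (fun i h1i h2i => hl i h1i h2i)
        (fun i h1i h2i => hr i h1i (by omega))
  · simp only [h, if_false]; omega
termination_by hi - lo
decreasing_by all_goals omega

-- getD at a valid index is a member
theorem pvGetD_mem (s : List Int) (i : Nat) (hi : i < s.length) : s.getD i 0 ∈ s := by
  rw [List.getD_eq_getElem s 0 hi]; exact List.getElem_mem hi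

-- on a ≤-sorted list, the indices satisfying a downward-closed test form the prefix of length countP
theorem sorted_getD_iff (s : List Int) (p : Int → Prop) [DecidablePred p]
    (hs : s.Pairwise (· ≤ ·)) (hdown : ∀ a b : Int, a ≤ b → p b → p a) :
    ∀ i, i < s.length → (p (s.getD i 0) ↔ i < s.countP (fun x => decide (p x))) := by
  induction s with
  | nil => intro i hi; simp at hi
  | cons a t ih =>
    intro i hi
    rw [List.pairwise_cons] at hs
    by_cases hpa : p a
    · have hc : (a :: t).countP (fun x => decide (p x)) = t.countP (fun x => decide (p x)) + 1 := by
        rw [List.countP_cons]; simp [hpa]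
      cases i with
      | zero => simpa [hc] using hpa
      | succ j =>
        have := ih hs.2 j (by simpa using hi)
        simpa [hc, List.getD_cons_succ] using this
    · have hall : ∀ x ∈ a :: t, ¬ p x := by
        intro x hx hpx
        rcases List.mem_cons.mp hx with rfl | hx'
        · exact hpa hpx
        · exact hpa (hdown a x (hs.1 x hx') hpx)
      have hc : (a :: t).countP (fun x => decide (p x)) = 0 := by
        apply List.countP_eq_zero.mpr
        intro x hx; simpa using hall x hx
      rw [hc]
      constructor
      · intro hp
        exact absurd hp (hall _ (pvGetD_mem _ _ hi))
      · omega

-- A's fold computes the two countP values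
theorem foldA (xs : List Int) (num : Int) (a b : Int) :
    xs.foldl (fun (ab : Int × Int) v =>
        (if v > num then ab.1 + 1 else ab.1,
         if v < num then ab.2 + 1 else ab.2)) (a, b)
      = (a + xs.countP (fun v => decide (v > num)), b + xs.countP (fun v => decide (v < num))) := by
  induction xs generalizing a b with
  | nil => simp
  | cons x t ih =>
    simp only [List.foldl_cons, ih, List.countP_cons]
    rcases lt_trichotomy x num with h | h | h
    · simp [h, not_lt.mpr h.le, Prod.ext_iff]
      ring
    · subst h
      simp
    · simp [not_lt.mpr h.le, h, Prod.ext_iff]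
      ring

-- ===== VERDICT (by name: the statement is the Claim_ definition above) =====
theorem Above_and_Below_spec : Claim_equal_Above_and_Below := by
  intro xs num _
  unfold Spec_Above_and_Below Above_and_Below Above_and_Below_alt
  by_cases hnil : xs.length = 0
  · simp [hnil]
  · simp only [beq_iff_eq, hnil, if_false]
    set s := PySem.List.sorted xs (fun x => x) false with hs
    have hperm : s.Perm xs := PySem.List.sorted_perm _ _ _
    have hpw : s.Pairwise (· ≤ ·) := by
      simpa using PySem.List.sorted_pairwise xs (fun x => x)
    have hlen : s.length = xs.length := hperm.length_eq
    -- the fold side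
    have hfold := PySem.List.foldl_pyRange_zero_pyGetD' xs (0 : Int)
      (fun (ab : Int × Int) v =>
        (if v > num then ab.1 + 1 else ab.1,
         if v < num then ab.2 + 1 else ab.2)) (((0 : Int), (0 : Int)))
    simp only [hfold, foldA]
    -- the binary-search side
    have hlt : pvBLt s num 0 s.length = s.countP (fun x => decide (x < num)) := by
      have hcle : s.countP (fun x => decide (x < num)) ≤ s.length := List.countP_le_length
      apply pvBLt_eq s num 0 s.length _ (by omega) hcle
      · intro i _ hik
        exact (sorted_getD_iff s (fun x => x < num) hpw
          (fun a b hab hb => lt_of_le_of_lt hab hb) i (by omega)).mpr hik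
      · intro i hik hilen hpi
        exact absurd ((sorted_getD_iff s (fun x => x < num) hpw
          (fun a b hab hb => lt_of_le_of_lt hab hb) i hilen).mp hpi) (by omega)
    have hle : pvBLe s num 0 s.length = s.countP (fun x => decide (x ≤ num)) := by
      have hcle : s.countP (fun x => decide (x ≤ num)) ≤ s.length := List.countP_le_length
      apply pvBLe_eq s num 0 s.length _ (by omega) hcle
      · intro i _ hik
        exact (sorted_getD_iff s (fun x => x ≤ num) hpw
          (fun a b hab hb => le_trans hab hb) i (by omega)).mpr hik
      · intro i hik hilen hpi
        exact absurd ((sorted_getD_iff s (fun x => x ≤ num) hpw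
          (fun a b hab hb => le_trans hab hb) i hilen).mp hpi) (by omega)
    -- counts over s equal counts over xs
    have hclt : s.countP (fun x => decide (x < num)) = xs.countP (fun x => decide (x < num)) :=
      hperm.countP_eq _
    have hcgt : s.length - s.countP (fun x => decide (x ≤ num))
        = xs.countP (fun x => decide (x > num)) := by
      have hsplit : s.countP (fun x => decide (x ≤ num)) + s.countP (fun x => decide (x > num))
          = s.length := by
        have := List.length_eq_countP_add_countP (l := s) (p := fun x => decide (x ≤ num))
        rw [this]
        congr 1
        apply List.countP_congr
        intro x _
        simp [not_le, gt_iff_lt]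
      have := hperm.countP_eq (fun x => decide (x > num))
      omega
    simp only [hlt, hle, hclt, hcgt, zero_add]
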